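-- pv_equiv track=rewrite | github.com/abhirajadhikary06/aviation-batch-data-warehouse-analytics-pipeline | src/warehouse/run_dbt.py | _is_connection_issue
-- ===== SOURCE A (Python) =====
-- def _is_connection_issue(output: str) -> bool:
--     text = output.lower()
--     patterns = [
--         "unable to connect",
--         "could not connect",
--         "connection refused",
--         "timed out",
--         "timeout",
--         "network is unreachable",
--         "name or service not known",
--         "temporary failure in name resolution",
--     ]
--     return any(pattern in text for pattern in patterns)
-- ===== SOURCE B (Python) =====
-- _KEYWORDS = (
--     "unable to connect",
--     "could not connect",
--     "connection refused",
--     "timed out",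
--     "timeout",
--     "network is unreachable",
--     "name or service not known",
--     "temporary failure in name resolution",
-- )
--
--
-- def _is_connection_issue(output: str) -> bool:
--     text = output.lower()
--     for i in range(len(text)):
--         for kw in _KEYWORDS:
--             if text.startswith(kw, i):
--                 return True
--     return False
-- ===== Notes on version B (the rewrite author's own statement) =====
-- stated objective: alternative
-- what changed: B replaces eight independent full substring-containment scans (any over the pattern list) with a single left-to-right pass over the lowered text that tests at each position whether any keyword starts there, returning early on the first hit.
import Mathlib
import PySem

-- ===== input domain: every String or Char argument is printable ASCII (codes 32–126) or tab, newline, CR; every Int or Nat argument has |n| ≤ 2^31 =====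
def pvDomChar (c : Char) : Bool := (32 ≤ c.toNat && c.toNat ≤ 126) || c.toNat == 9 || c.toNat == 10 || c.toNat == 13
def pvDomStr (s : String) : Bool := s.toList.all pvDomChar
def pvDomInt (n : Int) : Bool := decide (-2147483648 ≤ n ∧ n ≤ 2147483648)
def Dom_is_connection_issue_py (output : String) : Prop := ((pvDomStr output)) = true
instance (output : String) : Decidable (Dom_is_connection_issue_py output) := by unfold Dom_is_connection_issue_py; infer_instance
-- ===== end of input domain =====

-- B: one left-to-right positional pass testing keyword prefixes, instead of A's eight separate substring-containment scans (alternative decomposition; no speed claim).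


-- ===== PORT A =====
def is_connection_issue_py (output : String) : Bool :=
  let text := PySem.Str.lower output
  let patterns : List String :=
    [ "unable to connect",
      "could not connect",
      "connection refused",
      "timed out",
      "timeout",
      "network is unreachable",
      "name or service not known",
      "temporary failure in name resolution" ]
  patterns.any (fun pattern => PySem.Str.isIn pattern text)

-- ===== PORT B =====
def pvKeywords : List (List Char) :=
  [ "unable to connect".toList,
    "could not connect".toList,
    "connection refused".toList,
    "timed out".toList,
    "timeout".toList,
    "network is unreachable".toList,
    "name or service not known".toList,
    "temporary failure in name resolution".toList ]

-- the position scan: at each index test whether some keyword starts there (text.startswith(kw, i))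
def pvScan (kws : List (List Char)) : List Char → Bool
  | [] => false
  | c :: rest =>
    if kws.any (fun kw => kw.isPrefixOf (c :: rest)) then true
    else pvScan kws rest

def is_connection_issue_py_alt (output : String) : Bool :=
  pvScan pvKeywords (PySem.Str.lower output).toList

-- ===== PRECONDITION & SPEC =====
def Spec_is_connection_issue_py (output : String) (out : Bool) : Prop := out = is_connection_issue_py_alt output
instance (output : String) (out : Bool) : Decidable (Spec_is_connection_issue_py output out) := by unfold Spec_is_connection_issue_py; infer_instance

-- ===== CLAIM (what is proved, stated in full; the proofs are below) =====
def Claim_equal_is_connection_issue_py : Prop := ∀ (output : String), Dom_is_connection_issue_py output → Spec_is_connection_issue_py output (is_connection_issue_py output)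

-- ===== LEMMAS AND PROOFS =====

theorem pvScan_iff (kws : List (List Char)) (hkws : ∀ k ∈ kws, k ≠ []) (cs : List Char) :
    pvScan kws cs = true ↔ ∃ k ∈ kws, k <:+: cs := by
  induction cs with
  | nil =>
    simp only [pvScan, Bool.false_eq_true, false_iff]
    rintro ⟨k, hk, hinf⟩
    exact absurd (List.eq_nil_of_infix_nil hinf) (hkws k hk)
  | cons c rest ih =>
    simp only [pvScan]
    by_cases h : kws.any (fun kw => kw.isPrefixOf (c :: rest)) = true
    · simp only [h, if_true, true_iff]
      rw [List.any_eq_true] at h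
      obtain ⟨k, hk, hp⟩ := h
      exact ⟨k, hk, (List.isPrefixOf_iff_prefix.mp hp).isInfix⟩
    · rw [if_neg h, ih]
      constructor
      · rintro ⟨k, hk, hinf⟩
        exact ⟨k, hk, hinf.trans (List.suffix_cons c rest).isInfix⟩
      · rintro ⟨k, hk, hinf⟩
        rcases List.infix_cons_iff.mp hinf with hp | hi
        · exact absurd (by rw [List.any_eq_true]; exact ⟨k, hk, List.isPrefixOf_iff_prefix.mpr hp⟩) h
        · exact ⟨k, hk, hi⟩

-- ===== VERDICT (by name: the statement is the Claim_ definition above) =====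
theorem is_connection_issue_py_spec : Claim_equal_is_connection_issue_py := by
  intro output _
  unfold Spec_is_connection_issue_py is_connection_issue_py is_connection_issue_py_alt
  rw [Bool.eq_iff_iff, List.any_eq_true, pvScan_iff _ (by decide)]
  simp [PySem.Chars.isIn_iff_infix, pvKeywords]
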